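-- pv_equiv track=rewrite | github.com/keiouok/atcoder | 0413/we_like_agc.py | no_agc
-- ===== SOURCE A (Python) =====
-- def no_agc(last4):
--     for i in range(4):
--         cp_last4 = list(last4)
--         if i >= 1:
--             cp_last4[i-1], cp_last4[i] = cp_last4[i], cp_last4[i-1]
--         cp_last_sent = "".join(cp_last4)
--         if cp_last_sent.count("AGC") >= 1:
--             return False
--     return True
-- ===== SOURCE B (Python) =====
-- def no_agc(last4):
--     # Single-pass local-window check: after ruling out "AGC" in the full join,
--     # each adjacent swap can only create an occurrence of "AGC" inside the
--     # window (last 2 chars of the prefix) + swapped pair + (first 2 chars of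
--     # the suffix), so only that window is scanned per swap -- no per-candidate
--     # copy/join of the whole list.
--     s = "".join(last4)
--     if "AGC" in s:
--         return False
--     heads = [""]
--     for x in reversed(last4):
--         heads.append((x + heads[-1])[:2])
--     heads.reverse()
--     tail = ""
--     for i in range(1, 4):
--         a = last4[i - 1]
--         b = last4[i]
--         if "AGC" in tail + b + a + heads[i + 1]:
--             return False
--         tail = (tail + a)[-2:]
--     return True
-- ===== Notes on version B (the rewrite author's own statement) =====
-- stated objective: alternative
-- what changed: A copies the list, swaps two elements, re-joins and scans the full candidate string for each of the four swap candidates; B scans the full join once and then, per adjacent swap, checks only the local window (last 2 chars of the prefix) + swapped pair + (first 2 chars of the suffix), maintained in a single pass with a running tail and precomputed suffix heads.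
import Mathlib
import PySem

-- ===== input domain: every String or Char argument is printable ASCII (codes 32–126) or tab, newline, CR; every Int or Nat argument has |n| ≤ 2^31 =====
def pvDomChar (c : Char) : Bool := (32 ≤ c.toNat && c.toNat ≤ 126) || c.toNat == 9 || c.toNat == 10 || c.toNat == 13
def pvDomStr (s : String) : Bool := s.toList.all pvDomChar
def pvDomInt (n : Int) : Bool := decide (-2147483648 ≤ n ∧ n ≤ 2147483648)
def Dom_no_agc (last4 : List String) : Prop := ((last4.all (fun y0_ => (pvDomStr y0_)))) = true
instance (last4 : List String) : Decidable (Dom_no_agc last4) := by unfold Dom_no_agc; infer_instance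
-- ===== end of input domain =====

-- B rules out "AGC" in the one full join and then checks, per adjacent swap, only the local
-- window (last 2 chars of the prefix) ++ swapped pair ++ (first 2 chars of the suffix),
-- maintained in a single pass — instead of A's per-candidate list copy + swap + re-join + scan.

-- ===== PORT A =====
-- cp_last4[i-1], cp_last4[i] = cp_last4[i], cp_last4[i-1]
-- (i ∈ {1,2,3} whenever reached under Pre_, so .toNat on i and i-1 is exact; out-of-range
-- access raises IndexError in Python and lies outside Pre_, the .getD "" default is never used there)
def pySwapAssign (l : List String) (i : Int) : List String :=
  let x := (PySem.List.pyGet? l i).getD ""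
  let y := (PySem.List.pyGet? l (i - 1)).getD ""
  (l.set (i - 1).toNat x).set i.toNat y

def noAgcLoop (last4 : List String) : List Int → Bool
  | [] => true
  | i :: rest =>
    let cp := if i ≥ 1 then pySwapAssign last4 i else last4
    let s := PySem.Str.join "" cp
    if 1 ≤ PySem.Str.count s "AGC" then false else noAgcLoop last4 rest

def no_agc (last4 : List String) : Bool := noAgcLoop last4 (PySem.List.pyRange 0 4 1)

-- ===== PORT B =====
-- the Python '+' chains on strings are ported as "".join of the pieces
def noAgcAltLoop (last4 heads : List String) : String → List Int → Bool
  | _, [] => true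
  | tail, i :: rest =>
    let a := (PySem.List.pyGet? last4 (i - 1)).getD ""
    let b := (PySem.List.pyGet? last4 i).getD ""
    if PySem.Str.isIn "AGC"
        (PySem.Str.join "" [tail, b, a, (PySem.List.pyGet? heads (i + 1)).getD ""]) then false
    else noAgcAltLoop last4 heads
      (PySem.Str.slice (PySem.Str.join "" [tail, a]) (some (-2)) none) rest

def no_agc_alt (last4 : List String) : Bool :=
  let s := PySem.Str.join "" last4
  if PySem.Str.isIn "AGC" s then false
  else
    let heads0 := last4.reverse.foldl
      (fun acc x => acc ++ [PySem.Str.slice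
        (PySem.Str.join "" [x, (PySem.List.pyGet? acc (-1)).getD ""]) none (some 2)]) [""]
    noAgcAltLoop last4 heads0.reverse "" (PySem.List.pyRange 1 4 1)

-- ===== PRECONDITION & SPEC =====
-- Pre_ admits exactly the inputs on which A returns: every list of length >= 4, and a
-- shorter list only when one of the joined candidate strings A inspects before its first
-- out-of-range access already contains "AGC" (A then returns False early; so does B).
def Pre_no_agc (last4 : List String) : Prop :=
  4 ≤ last4.length ∨
  (1 ≤ last4.length ∧ PySem.Str.isIn "AGC" (PySem.Str.join "" last4) = true) ∨
  (2 ≤ last4.length ∧ PySem.Str.isIn "AGC"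
     (PySem.Str.join "" (last4.getD 1 "" :: last4.getD 0 "" :: last4.drop 2)) = true) ∨
  (3 ≤ last4.length ∧ PySem.Str.isIn "AGC"
     (PySem.Str.join "" (last4.getD 0 "" :: last4.getD 2 "" :: last4.getD 1 "" :: last4.drop 3)) = true)
instance (last4 : List String) : Decidable (Pre_no_agc last4) := by unfold Pre_no_agc; infer_instance
def pvWitness_no_agc : List String := ["A", "G", "A", "C"]

def Spec_no_agc (last4 : List String) (out : Bool) : Prop := out = no_agc_alt last4
instance (last4 : List String) (out : Bool) : Decidable (Spec_no_agc last4 out) := by unfold Spec_no_agc; infer_instance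

-- ===== CLAIM (what is proved, stated in full; the proofs are below) =====
def Claim_equal_no_agc : Prop := ∀ (last4 : List String), Dom_no_agc last4 → Pre_no_agc last4 → Spec_no_agc last4 (no_agc last4)

-- ===== LEMMAS AND PROOFS =====

lemma chars_join_nil_eq_flatten (l : List (List Char)) : PySem.Chars.join [] l = l.flatten := by
  induction l with
  | nil => simp [PySem.Chars.join_nil]
  | cons p rest ih =>
    cases rest with
    | nil => simp [PySem.Chars.join, List.intercalate]
    | cons q r => simp [PySem.Chars.join_cons_cons, ih]

lemma count_go_ge (sub : List Char) (fuel : Nat) (l : List Char) (acc : Nat) :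
    acc ≤ PySem.Chars.count.go sub fuel l acc := by
  induction fuel generalizing l acc with
  | zero => simp [PySem.Chars.count.go]
  | succ f ih =>
    cases l with
    | nil => simp [PySem.Chars.count.go]
    | cons h t =>
      rw [PySem.Chars.count.go]
      split
      · exact le_trans (Nat.le_succ acc) (ih _ _)
      · exact ih _ _

lemma count_go_pos_iff (sub : List Char) (hsub : sub ≠ []) (fuel : Nat) (l : List Char)
    (hf : l.length ≤ fuel) (acc : Nat) :
    (1 ≤ PySem.Chars.count.go sub fuel l acc) ↔ (1 ≤ acc ∨ sub <:+: l) := by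
  induction fuel generalizing l acc with
  | zero =>
    have hl : l = [] := by cases l <;> simp_all
    subst hl
    simp [PySem.Chars.count.go, List.infix_nil, hsub]
  | succ f ih =>
    cases l with
    | nil => simp [PySem.Chars.count.go, List.infix_nil, hsub]
    | cons h t =>
      rw [PySem.Chars.count.go]
      split
      · rename_i hpre
        constructor
        · intro _
          right
          exact List.IsPrefix.isInfix (List.isPrefixOf_iff_prefix.mp hpre)
        · intro _
          exact le_trans (by omega) (count_go_ge sub f _ (acc + 1))
      · rename_i hpre
        have ht : t.length ≤ f := by simpa using hf
        rw [ih t ht acc, List.infix_cons_iff]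
        have : ¬ (sub <+: h :: t) := fun hp => hpre (List.isPrefixOf_iff_prefix.mpr hp)
        tauto

lemma count_pos_iff_infix (s sub : List Char) (hsub : sub ≠ []) :
    (1 ≤ PySem.Chars.count s sub) ↔ sub <:+: s := by
  have h0 : sub.isEmpty = false := by simpa using hsub
  rw [PySem.Chars.count]
  simp only [h0, Bool.false_eq_true, if_false]
  rw [count_go_pos_iff sub hsub s.length s le_rfl 0]
  simp

lemma take_drop_infix {α : Type} (l : List α) (j k : Nat) : (l.drop j).take k <:+: l :=
  ((List.take_prefix k _).isInfix).trans ((List.drop_suffix j l).isInfix)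

lemma extract_infix {α : Type} (s sub t A W B : List α)
    (hL : s ++ sub ++ t = A ++ (W ++ B)) (h1 : A.length ≤ s.length)
    (h2 : s.length + sub.length ≤ A.length + W.length) : sub <:+: W := by
  have h0 : s.length - A.length - W.length = 0 := by omega
  have hdrop : ((A ++ (W ++ B)).drop s.length) = W.drop (s.length - A.length) ++ B := by
    rw [List.drop_append, List.drop_eq_nil_of_le h1, List.nil_append, List.drop_append, h0,
      List.drop_zero]
  have hsub : sub = (W.drop (s.length - A.length) ++ B).take sub.length := by
    calc sub = ((s ++ (sub ++ t)).drop s.length).take sub.length := by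
          rw [List.drop_left, List.take_left]
    _ = (W.drop (s.length - A.length) ++ B).take sub.length := by
          rw [← List.append_assoc, hL, hdrop]
  have hz : sub.length - (W.drop (s.length - A.length)).length = 0 := by simp; omega
  rw [List.take_append, hz, List.take_zero, List.append_nil] at hsub
  rw [hsub]; exact take_drop_infix _ _ _

lemma assoc4 (P M T : List Char) :
    P.take (P.length - 2) ++ (P.drop (P.length - 2) ++ M ++ T.take 2) ++ T.drop 2
      = P ++ M ++ T := by
  rw [← List.append_assoc, ← List.append_assoc, List.take_append_drop,
    List.append_assoc (P ++ M), List.take_append_drop]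

lemma infix3_split (sub P M T : List Char) (h3 : sub.length = 3) :
    sub <:+: (P ++ M ++ T) ↔
      sub <:+: P ∨ sub <:+: T ∨ sub <:+: (P.drop (P.length - 2) ++ M ++ T.take 2) := by
  constructor
  · rintro ⟨s, t, hL⟩
    have hlen : s.length + (sub.length + t.length) = P.length + (M.length + T.length) := by
      simpa using congrArg List.length hL
    by_cases hc1 : s.length + 3 ≤ P.length
    · left
      exact extract_infix s sub t [] P (M ++ T) (by simpa [List.append_assoc] using hL)
        (by simp) (by simp; omega)
    · by_cases hc2 : P.length + M.length ≤ s.length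
      · right; left
        exact extract_infix s sub t (P ++ M) T [] (by simpa [List.append_assoc] using hL)
          (by simpa using hc2) (by simp; omega)
      · right; right
        apply extract_infix s sub t (P.take (P.length - 2))
          (P.drop (P.length - 2) ++ M ++ T.take 2) (T.drop 2)
        · rw [hL, ← List.append_assoc (P.take (P.length - 2)), assoc4]
        · simp; omega
        · simp; omega
  · rintro (h | h | h)
    · exact h.trans ⟨[], M ++ T, by simp [List.append_assoc]⟩
    · exact h.trans ⟨P ++ M, [], by simp⟩
    · exact h.trans ⟨P.take (P.length - 2), T.drop 2, assoc4 P M T⟩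

def hspec : List String → String
  | [] => ""
  | x :: xs => PySem.Str.slice (PySem.Str.join "" [x, hspec xs]) none (some 2)

def Hspec : List String → List String
  | [] => [""]
  | x :: xs => hspec (x :: xs) :: Hspec xs

lemma foldl_heads (l : List String) :
    l.reverse.foldl (fun acc x => acc ++ [PySem.Str.slice
        (PySem.Str.join "" [x, (PySem.List.pyGet? acc (-1)).getD ""]) none (some 2)]) [""]
      = (Hspec l).reverse := by
  rw [List.foldl_reverse]
  induction l with
  | nil => rfl
  | cons x xs ih =>
    rw [List.foldr_cons, ih, PySem.List.pyGet?_neg_one, List.getLast?_reverse]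
    have hh : (Hspec xs).head? = some (hspec xs) := by cases xs <;> rfl
    rw [hh, Option.getD_some, Hspec, List.reverse_cons, hspec]

lemma take2_absorb (x y : List Char) : (x ++ y.take 2).take 2 = (x ++ y).take 2 := by
  rw [List.take_append, List.take_append, List.take_take]
  congr 2
  exact Nat.min_eq_left (by omega)

lemma hspec_toList (l : List String) :
    (hspec l).toList = ((l.map String.toList).flatten).take 2 := by
  induction l with
  | nil => rfl
  | cons x xs ih =>
    rw [hspec]
    rw [PySem.Str.toList_slice, PySem.Chars.slice_eq_listSlice, PySem.List.slice_to,
      PySem.Str.toList_join, show ("" : String).toList = [] from rfl,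
      chars_join_nil_eq_flatten, List.map_cons, List.map_cons, List.map_nil,
      List.flatten_cons, List.flatten_cons, List.flatten_nil, List.append_nil, ih,
      show ((2:Int)).toNat = 2 from rfl, take2_absorb, List.map_cons, List.flatten_cons]
    omega

lemma last2_absorb (x y : List Char) :
    (x.drop (x.length - 2) ++ y).drop ((x.drop (x.length - 2) ++ y).length - 2)
      = (x ++ y).drop ((x ++ y).length - 2) := by
  rw [List.drop_append, List.drop_append, List.drop_drop]
  congr 2 <;> simp <;> omega

lemma countA_iff (s : List Char) :
    (1 ≤ PySem.Chars.count s "AGC".toList) ↔ "AGC".toList <:+: s :=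
  count_pos_iff_infix s _ (by decide)

lemma window_iff_gen (S P M T W C : List Char) (hS : ¬ "AGC".toList <:+: S)
    (hP : P <:+: S) (hT : T <:+: S)
    (hW : W = P.drop (P.length - 2) ++ M ++ T.take 2) (hC : C = P ++ M ++ T) :
    ("AGC".toList <:+: W) ↔ ("AGC".toList <:+: C) := by
  subst hW hC
  rw [infix3_split _ P M T (by decide)]
  have h1 : ¬ "AGC".toList <:+: P := fun h => hS (h.trans hP)
  have h2 : ¬ "AGC".toList <:+: T := fun h => hS (h.trans hT)
  tauto

lemma main4 (a b c d : String) (rest : List String) :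
    no_agc (a::b::c::d::rest) = no_agc_alt (a::b::c::d::rest) := by
  have hr0 : PySem.List.pyRange 0 4 1 = [0,1,2,3] := by decide
  have hr1 : PySem.List.pyRange 1 4 1 = [1,2,3] := by decide
  simp only [no_agc, no_agc_alt, hr0, hr1, noAgcLoop, noAgcAltLoop, pySwapAssign,
    foldl_heads, List.reverse_reverse]
  simp only [pysem]
  have hH : Hspec (a::b::c::d::rest) = hspec (a::b::c::d::rest) :: hspec (b::c::d::rest)
      :: hspec (c::d::rest) :: hspec (d::rest) :: Hspec rest := by
    rw [Hspec, Hspec, Hspec, Hspec]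
  have hHr : ∃ z zs, Hspec rest = z :: zs ∧ z = hspec rest := by
    cases rest with
    | nil => exact ⟨"", [], rfl, rfl⟩
    | cons u us => exact ⟨_, _, rfl, rfl⟩
  obtain ⟨z, zs, hz, hzv⟩ := hHr
  rw [hH, hz, hzv]
  have g0 : (PySem.List.pyGet? (a::b::c::d::rest) ((1:Int) - 1)).getD "" = a := by
    norm_num [pysem]
  have g1 : (PySem.List.pyGet? (a::b::c::d::rest) ((2:Int) - 1)).getD "" = b := by
    norm_num [pysem]; try rfl
  have g2 : (PySem.List.pyGet? (a::b::c::d::rest) ((3:Int) - 1)).getD "" = c := by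
    norm_num [pysem]; try rfl
  have gh2 : (PySem.List.pyGet? (hspec (a::b::c::d::rest) :: hspec (b::c::d::rest)
      :: hspec (c::d::rest) :: hspec (d::rest) :: hspec rest :: zs) ((1:Int) + 1)).getD ""
      = hspec (c::d::rest) := by norm_num [pysem]; try rfl
  have gh3 : (PySem.List.pyGet? (hspec (a::b::c::d::rest) :: hspec (b::c::d::rest)
      :: hspec (c::d::rest) :: hspec (d::rest) :: hspec rest :: zs) ((2:Int) + 1)).getD ""
      = hspec (d::rest) := by norm_num [pysem]; try rfl
  have gh4 : (PySem.List.pyGet? (hspec (a::b::c::d::rest) :: hspec (b::c::d::rest)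
      :: hspec (c::d::rest) :: hspec (d::rest) :: hspec rest :: zs) ((3:Int) + 1)).getD ""
      = hspec rest := by norm_num [pysem]; try rfl
  rw [g0, g1, g2, gh2, gh3, gh4]
  norm_num [countA_iff, chars_join_nil_eq_flatten]
  have hset2 : ((a.toList :: c.toList :: c.toList :: d.toList :: List.map String.toList rest).set
      (Int.toNat 2) b.toList) = a.toList :: c.toList :: b.toList :: d.toList
      :: List.map String.toList rest := rfl
  have hset3 : (((a.toList :: b.toList :: c.toList :: d.toList :: List.map String.toList rest).set
      (Int.toNat 2) d.toList).set (Int.toNat 3) c.toList) = a.toList :: b.toList :: d.toList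
      :: c.toList :: List.map String.toList rest := rfl
  rw [hset2, hset3, List.flatten_cons, List.flatten_cons, List.flatten_cons, List.flatten_cons,
    List.flatten_cons, List.flatten_cons, List.flatten_cons, List.flatten_cons,
    PySem.List.slice_from_neg_ofNat a.toList 2 (by omega),
    PySem.List.slice_from_neg_ofNat (a.toList.drop (a.toList.length - 2) ++ b.toList) 2 (by omega),
    last2_absorb, hspec_toList, hspec_toList, hspec_toList]
  simp only [List.map_cons, List.flatten_cons]
  by_cases hS : "AGC".toList <:+: a.toList ++ (b.toList ++ (c.toList ++ (d.toList ++ (List.map String.toList rest).flatten)))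
  · rw [decide_eq_true hS]
    simp
  · have h1 := window_iff_gen (a.toList ++ (b.toList ++ (c.toList ++ (d.toList ++ (List.map String.toList rest).flatten))))
      [] (b.toList ++ a.toList) (c.toList ++ (d.toList ++ (List.map String.toList rest).flatten))
      (b.toList ++ (a.toList ++ List.take 2 (c.toList ++ (d.toList ++ (List.map String.toList rest).flatten))))
      (b.toList ++ (a.toList ++ (c.toList ++ (d.toList ++ (List.map String.toList rest).flatten))))
      hS List.nil_infix ⟨a.toList ++ b.toList, [], by simp [List.append_assoc]⟩
      (by simp [List.append_assoc]) (by simp [List.append_assoc])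
    have h2 := window_iff_gen (a.toList ++ (b.toList ++ (c.toList ++ (d.toList ++ (List.map String.toList rest).flatten))))
      a.toList (c.toList ++ b.toList) (d.toList ++ (List.map String.toList rest).flatten)
      (List.drop (a.toList.length - 2) a.toList ++
        (c.toList ++ (b.toList ++ List.take 2 (d.toList ++ (List.map String.toList rest).flatten))))
      (a.toList ++ (c.toList ++ (b.toList ++ (d.toList ++ (List.map String.toList rest).flatten))))
      hS ⟨[], b.toList ++ (c.toList ++ (d.toList ++ (List.map String.toList rest).flatten)), by simp⟩
      ⟨a.toList ++ (b.toList ++ c.toList), [], by simp [List.append_assoc]⟩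
      (by simp [List.append_assoc]) (by simp [List.append_assoc])
    have h3 := window_iff_gen (a.toList ++ (b.toList ++ (c.toList ++ (d.toList ++ (List.map String.toList rest).flatten))))
      (a.toList ++ b.toList) (d.toList ++ c.toList) (List.map String.toList rest).flatten
      (List.drop ((a.toList ++ b.toList).length - 2) (a.toList ++ b.toList) ++
        (d.toList ++ (c.toList ++ List.take 2 (List.map String.toList rest).flatten)))
      (a.toList ++ (b.toList ++ (d.toList ++ (c.toList ++ (List.map String.toList rest).flatten))))
      hS ⟨[], c.toList ++ (d.toList ++ (List.map String.toList rest).flatten), by simp [List.append_assoc]⟩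
      ⟨a.toList ++ (b.toList ++ (c.toList ++ d.toList)), [], by simp [List.append_assoc]⟩
      (by simp [List.append_assoc]) (by simp [List.append_assoc])
    simp only [h1, h2, h3]


lemma first_hit (l : List String) (h : PySem.Str.isIn "AGC" (PySem.Str.join "" l) = true) :
    no_agc l = no_agc_alt l := by
  have hr0 : PySem.List.pyRange 0 4 1 = [0,1,2,3] := by decide
  simp only [no_agc, no_agc_alt, hr0, noAgcLoop]
  simp only [pysem] at h ⊢
  have h' : "AGC".toList <:+: PySem.Chars.join [] (l.map String.toList) := by
    simpa using h
  norm_num [countA_iff, h']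

lemma main2 (a b : String)
    (h : PySem.Str.isIn "AGC" (PySem.Str.join "" [b, a]) = true) :
    no_agc [a, b] = no_agc_alt [a, b] := by
  by_cases hS : PySem.Str.isIn "AGC" (PySem.Str.join "" [a, b]) = true
  · exact first_hit _ hS
  · have hr0 : PySem.List.pyRange 0 4 1 = [0,1,2,3] := by decide
    have hr1 : PySem.List.pyRange 1 4 1 = [1,2,3] := by decide
    simp only [no_agc, no_agc_alt, hr0, hr1, noAgcLoop, noAgcAltLoop, pySwapAssign,
      foldl_heads, List.reverse_reverse]
    simp only [pysem] at h hS ⊢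
    rw [show Hspec [a, b] = [hspec [a, b], hspec [b], ""] from rfl]
    norm_num [countA_iff, chars_join_nil_eq_flatten, PySem.List.pyGet?, PySem.List.pyIdx?] at h hS ⊢
    rw [show [hspec [a, b], hspec [b], ""][Int.toNat 2] = "" from rfl]
    simp only [show ("":String).toList = ([]:List Char) from rfl, List.append_nil]
    rw [show "AGC".toList = ['A','G','C'] from rfl] at h
    simp [h]

lemma main3s1 (a b c : String)
    (h : PySem.Str.isIn "AGC" (PySem.Str.join "" [b, a, c]) = true) :
    no_agc [a, b, c] = no_agc_alt [a, b, c] := by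
  by_cases hS : PySem.Str.isIn "AGC" (PySem.Str.join "" [a, b, c]) = true
  · exact first_hit _ hS
  · have hr0 : PySem.List.pyRange 0 4 1 = [0,1,2,3] := by decide
    have hr1 : PySem.List.pyRange 1 4 1 = [1,2,3] := by decide
    simp only [no_agc, no_agc_alt, hr0, hr1, noAgcLoop, noAgcAltLoop, pySwapAssign,
      foldl_heads, List.reverse_reverse]
    simp only [pysem] at h hS ⊢
    rw [show Hspec [a, b, c] = [hspec [a, b, c], hspec [b, c], hspec [c], ""] from rfl]
    norm_num [countA_iff, chars_join_nil_eq_flatten, PySem.List.pyGet?, PySem.List.pyIdx?]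
      at h hS ⊢
    rw [show [hspec [a,b,c], hspec [b,c], hspec [c], ""][Int.toNat 2] = hspec [c] from rfl,
      hspec_toList]
    simp only [List.map_cons, List.map_nil, List.flatten_cons, List.flatten_nil, List.append_nil]
    have h1 := window_iff_gen (a.toList ++ (b.toList ++ c.toList)) [] (b.toList ++ a.toList)
      c.toList (b.toList ++ (a.toList ++ List.take 2 c.toList)) (b.toList ++ (a.toList ++ c.toList))
      hS List.nil_infix ⟨a.toList ++ b.toList, [], by simp [List.append_assoc]⟩
      (by simp [List.append_assoc]) (by simp [List.append_assoc])
    simp only [h1]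
    rw [show "AGC".toList = ['A','G','C'] from rfl] at h
    simp [h]

lemma main3s2 (a b c : String)
    (h : PySem.Str.isIn "AGC" (PySem.Str.join "" [a, c, b]) = true) :
    no_agc [a, b, c] = no_agc_alt [a, b, c] := by
  by_cases hS : PySem.Str.isIn "AGC" (PySem.Str.join "" [a, b, c]) = true
  · exact first_hit _ hS
  · have hr0 : PySem.List.pyRange 0 4 1 = [0,1,2,3] := by decide
    have hr1 : PySem.List.pyRange 1 4 1 = [1,2,3] := by decide
    simp only [no_agc, no_agc_alt, hr0, hr1, noAgcLoop, noAgcAltLoop, pySwapAssign,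
      foldl_heads, List.reverse_reverse]
    simp only [pysem] at h hS ⊢
    rw [show Hspec [a, b, c] = [hspec [a, b, c], hspec [b, c], hspec [c], ""] from rfl]
    norm_num [countA_iff, chars_join_nil_eq_flatten, PySem.List.pyGet?, PySem.List.pyIdx?]
      at h hS ⊢
    rw [show [hspec [a,b,c], hspec [b,c], hspec [c], ""][Int.toNat 2] = hspec [c] from rfl,
      show [hspec [a,b,c], hspec [b,c], hspec [c], ""][Int.toNat 3] = "" from rfl,
      show ([a.toList, c.toList, c.toList].set (Int.toNat 2) b.toList)
        = [a.toList, c.toList, b.toList] from rfl,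
      hspec_toList, PySem.List.slice_from_neg_ofNat a.toList 2 (by omega)]
    simp only [List.map_cons, List.map_nil, List.flatten_cons, List.flatten_nil, List.append_nil,
      show ("":String).toList = ([]:List Char) from rfl]
    have h1 := window_iff_gen (a.toList ++ (b.toList ++ c.toList)) [] (b.toList ++ a.toList)
      c.toList (b.toList ++ (a.toList ++ List.take 2 c.toList)) (b.toList ++ (a.toList ++ c.toList))
      hS List.nil_infix ⟨a.toList ++ b.toList, [], by simp [List.append_assoc]⟩
      (by simp [List.append_assoc]) (by simp [List.append_assoc])
    have h2 := window_iff_gen (a.toList ++ (b.toList ++ c.toList)) a.toList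
      (c.toList ++ b.toList) []
      (List.drop (a.toList.length - 2) a.toList ++ (c.toList ++ b.toList))
      (a.toList ++ (c.toList ++ b.toList))
      hS ⟨[], b.toList ++ c.toList, by simp⟩ List.nil_infix
      (by simp) (by simp)
    simp only [h1, h2]
    rw [show "AGC".toList = ['A','G','C'] from rfl] at h
    simp [h]

-- ===== VERDICT (by name: the statement is the Claim_ definition above) =====
theorem no_agc_spec : Claim_equal_no_agc := by
  intro last4 _ hpre
  unfold Spec_no_agc
  unfold Pre_no_agc at hpre
  rcases last4 with _ | ⟨a, _ | ⟨b, _ | ⟨c, _ | ⟨d, rest⟩⟩⟩⟩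
  · rcases hpre with h | ⟨h, _⟩ | ⟨h, _⟩ | ⟨h, _⟩ <;> simp at h
  · rcases hpre with h | ⟨_, h⟩ | ⟨h, _⟩ | ⟨h, _⟩
    · simp at h
    · exact first_hit _ h
    · simp at h
    · simp at h
  · rcases hpre with h | ⟨_, h⟩ | ⟨_, h⟩ | ⟨h, _⟩
    · simp at h
    · exact first_hit _ h
    · exact main2 a b (by simpa using h)
    · simp at h
  · rcases hpre with h | ⟨_, h⟩ | ⟨_, h⟩ | ⟨_, h⟩
    · simp at h
    · exact first_hit _ h
    · exact main3s1 a b c (by simpa using h)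
    · exact main3s2 a b c (by simpa using h)
  · exact main4 a b c d rest
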